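-- pv_equiv track=rewrite | github.com/zmd219-zz/2017-Projects | Z Danial - AirAnalytics Source.py | list_builder
-- ===== SOURCE A (Python) =====
-- def list_builder(range_start, range_length, item):
--     output_list = []
--     for i in range(range_start, range_length):
--         if item == 'i':
--             output_list.append(i)
--         else:
--             output_list.append(item)
--     return output_list
-- ===== SOURCE B (Python) =====
-- def list_builder(range_start, range_length, item):
--     n = range_length - range_start
--     if n <= 0:
--         return []
--     if item == 'i':
--         # doubling construction: out is always range_start..range_start+len(out)-1
--         out = [range_start]
--         while len(out) < n:
--             out = out + [x + len(out) for x in out]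
--         return out[:n]
--     out = [item]
--     while len(out) < n:
--         out = out + out
--     return out[:n]
-- ===== Notes on version B (the rewrite author's own statement) =====
-- stated objective: alternative
-- what changed: Instead of one per-element loop that appends and re-tests item each iteration, B computes the target length once and grows the result by repeated doubling (out + shifted copy of out for the range case, out + out for the repeat case) in O(log n) bulk steps, then truncates to length n.
-- outside the precondition, e.g. on list_builder(0, 2, 'x'): A returns ['x', 'x'], B returns ['x', 'x']
import Mathlib
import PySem

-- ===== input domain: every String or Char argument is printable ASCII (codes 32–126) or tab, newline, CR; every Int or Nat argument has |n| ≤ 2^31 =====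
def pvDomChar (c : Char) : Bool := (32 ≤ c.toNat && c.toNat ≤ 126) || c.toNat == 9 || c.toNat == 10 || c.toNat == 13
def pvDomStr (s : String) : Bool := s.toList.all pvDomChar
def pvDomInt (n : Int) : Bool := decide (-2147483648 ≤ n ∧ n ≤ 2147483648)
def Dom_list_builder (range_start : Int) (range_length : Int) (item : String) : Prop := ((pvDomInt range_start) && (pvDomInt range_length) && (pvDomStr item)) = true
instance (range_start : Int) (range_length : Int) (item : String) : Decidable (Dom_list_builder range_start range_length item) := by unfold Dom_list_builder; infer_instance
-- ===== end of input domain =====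

-- B replaces A's per-element append loop (which re-tests item each iteration) by a single
-- length computation followed by repeated doubling of the output list (objective: alternative).

-- ===== PORT A =====
-- Note: in Python, when item != 'i' and the range is nonempty, A appends the STRING item,
-- so its result is not a list of ints; those inputs lie outside Pre_list_builder, and on them
-- this port's else branch uses the placeholder 0 (the branch is unreachable inside Pre_).
def list_builder (range_start : Int) (range_length : Int) (item : String) : List Int :=
  (PySem.List.pyRange range_start range_length 1).foldl
    (fun output_list i => if item == "i" then output_list ++ [i] else output_list ++ [0]) []

-- ===== PORT B =====
-- 'while len(out) < n: out = out + [x + len(out) for x in out]' (the extra '0 < out.length'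
-- conjunct is a totality guard only; B always starts this loop from a singleton list).
def pvGrowI (n : Nat) (out : List Int) : List Int :=
  if _h : out.length < n ∧ 0 < out.length then
    pvGrowI n (out ++ out.map (fun x => x + (out.length : Int)))
  else out
termination_by n - out.length
decreasing_by simp; omega

-- 'while len(out) < n: out = out + out' (same totality guard).
def pvGrowS (n : Nat) (out : List Int) : List Int :=
  if _h : out.length < n ∧ 0 < out.length then pvGrowS n (out ++ out) else out
termination_by n - out.length
decreasing_by simp; omega

-- [item] * n outside Pre_ would be a list of strings; same placeholder 0, unreachable inside Pre_.
def list_builder_alt (range_start : Int) (range_length : Int) (item : String) : List Int :=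
  let n := range_length - range_start
  if n ≤ 0 then []
  else if item == "i" then (pvGrowI n.toNat [range_start]).take n.toNat
  else (pvGrowS n.toNat [0]).take n.toNat

-- ===== PRECONDITION & SPEC =====
-- Pre_ excludes inputs where item != 'i' and the range is nonempty: there the Python A returns a
-- list of STRINGS, which is not a value of the declared return type List Int (B agrees with A
-- there too; the exclusion is forced by the typing, not by any behavioural difference).
def Pre_list_builder (range_start : Int) (range_length : Int) (item : String) : Prop :=
  item = "i" ∨ range_length ≤ range_start
instance (range_start : Int) (range_length : Int) (item : String) : Decidable (Pre_list_builder range_start range_length item) := by unfold Pre_list_builder; infer_instance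
def pvWitness_list_builder : Int × Int × String := (0, 5, "i")
def Spec_list_builder (range_start : Int) (range_length : Int) (item : String) (out : List Int) : Prop := out = list_builder_alt range_start range_length item
instance (range_start : Int) (range_length : Int) (item : String) (out : List Int) : Decidable (Spec_list_builder range_start range_length item out) := by unfold Spec_list_builder; infer_instance

-- ===== CLAIM =====
def Claim_equal_list_builder : Prop := ∀ (range_start : Int) (range_length : Int) (item : String), Dom_list_builder range_start range_length item → Pre_list_builder range_start range_length item → Spec_list_builder range_start range_length item (list_builder range_start range_length item)

-- ===== LEMMAS AND PROOFS =====
-- the arithmetic progression a, a+1, …, a+L-1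
def pvR (a : Int) (L : Nat) : List Int := (List.range L).map (fun k : Nat => a + (k : Int))

theorem pvR_length (a : Int) (L : Nat) : (pvR a L).length = L := by
  simp [pvR]

theorem pvR_double (a : Int) (L : Nat) :
    pvR a L ++ (pvR a L).map (fun x => x + (L : Int)) = pvR a (L + L) := by
  unfold pvR
  rw [List.range_add, List.map_append, List.map_map, List.map_map]
  congr 1
  apply List.map_congr_left
  intro k _
  simp
  ring

theorem pvGrowI_spec_aux (n : Nat) (a : Int) (k : Nat) :
    ∀ (out : List Int), n - out.length ≤ k → 0 < out.length → out = pvR a out.length →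
    ∃ m, n ≤ m ∧ pvGrowI n out = pvR a m := by
  induction k with
  | zero =>
    intro out hk hpos hinv
    rw [pvGrowI, dif_neg (by omega)]
    exact ⟨out.length, by omega, hinv⟩
  | succ k ih =>
    intro out hk hpos hinv
    rw [pvGrowI]
    by_cases hc : out.length < n ∧ 0 < out.length
    · rw [dif_pos hc]
      apply ih
      · simp; omega
      · simp; omega
      · conv_lhs => rw [hinv, hinv]
        simp only [pvR_length]
        rw [pvR_double]
        congr 1
        simp
    · rw [dif_neg hc]
      exact ⟨out.length, by omega, hinv⟩

theorem pvGrowI_spec (n : Nat) (a : Int) (out : List Int)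
    (hpos : 0 < out.length) (hinv : out = pvR a out.length) :
    ∃ m, n ≤ m ∧ pvGrowI n out = pvR a m :=
  pvGrowI_spec_aux n a n out (by omega) hpos hinv

theorem pvR_take (a : Int) (n m : Nat) (h : n ≤ m) :
    (pvR a m).take n = pvR a n := by
  unfold pvR
  rw [← List.map_take, List.take_range, Nat.min_eq_left h]

-- ===== VERDICT =====
theorem list_builder_spec : Claim_equal_list_builder := by
  intro a b item _ hpre
  unfold Spec_list_builder list_builder list_builder_alt
  rcases hpre with h | h
  · subst h
    simp only [beq_self_eq_true, if_true]
    by_cases hle : b - a ≤ 0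
    · rw [PySem.List.pyRange_one_eq_nil (by omega), if_pos hle]
      simp
    · rw [if_neg hle]
      have h1 : ([a] : List Int) = pvR a ([a] : List Int).length := by
        simp [pvR]
      obtain ⟨m, hm, heq⟩ := pvGrowI_spec (b - a).toNat a [a] (by simp) h1
      rw [heq, pvR_take a _ m hm, PySem.List.pyRange_one, pvR]
      induction (b - a).toNat with
      | zero => simp
      | succ k ih =>
        rw [List.range_succ]
        simp [List.foldl_append, ih]
  · rw [PySem.List.pyRange_one_eq_nil h, if_pos (by omega)]
    simp
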